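-- pv_equiv track=rewrite | github.com/justanotherfivemdev/vibe5d-blender | engine/query/parser.py | _split_where_conditions
-- ===== SOURCE A (Python) =====
-- from typing import Dict, Any, List, Tuple
--
-- def _split_where_conditions(where_str: str) -> List[Tuple[str, str]]:
--     conditions_with_ops = []
--     current_condition = ""
--     i = 0
--
--     while i < len(where_str):
--         char = where_str[i]
--
--         if char in ('"', "'"):
--             quote_char = char
--             current_condition += char
--             i += 1
--
--             while i < len(where_str):
--                 char = where_str[i]
--                 current_condition += char
--                 if char == quote_char:
--                     if i + 1 < len(where_str) and where_str[i + 1] == quote_char: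
--                         i += 2
--                         current_condition += quote_char
--                     else:
--                         i += 1
--                         break
--                 else:
--                     i += 1
--             continue
--
--         if i + 3 <= len(where_str) and where_str[i:i + 3].upper() == 'AND':
--             if (i == 0 or where_str[i - 1].isspace()) and (i + 3 >= len(where_str) or where_str[i + 3].isspace()):
--                 conditions_with_ops.append((current_condition.strip(), 'AND'))
--                 current_condition = ""
--                 i += 3
--                 while i < len(where_str) and where_str[i].isspace():
--                     i += 1
--                 continue
--         elif i + 2 <= len(where_str) and where_str[i:i + 2].upper() == 'OR':
--             if (i == 0 or where_str[i - 1].isspace()) and (i + 2 >= len(where_str) or where_str[i + 2].isspace()):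
--                 conditions_with_ops.append((current_condition.strip(), 'OR'))
--                 current_condition = ""
--                 i += 2
--                 while i < len(where_str) and where_str[i].isspace():
--                     i += 1
--                 continue
--
--         current_condition += char
--         i += 1
--
--     if current_condition.strip():
--         conditions_with_ops.append((current_condition.strip(), None))
--
--     return conditions_with_ops
-- ===== SOURCE B (Python) =====
-- import re
-- from typing import List, Tuple
--
-- # Tokenizer: a whole quoted string (SQL doubled-quote escaping, unterminated
-- # quote swallows the rest) or a whitespace/start/end-bounded AND/OR operator.
-- _TOKEN = re.compile(
--     r"'(?:[^']|'')*'?"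
--     r'|"(?:[^"]|"")*"?'
--     r'|(?:(?<=\s)|^)(AND|OR)(?=\s|$)',
--     re.IGNORECASE,
-- )
--
-- def _split_where_conditions(where_str: str) -> List[Tuple[str, str]]:
--     parts = []
--     last_cut = 0
--     for m in _TOKEN.finditer(where_str):
--         op = m.group(1)
--         if op is not None:
--             parts.append((where_str[last_cut:m.start()].strip(), op.upper()))
--             last_cut = m.end()
--     tail = where_str[last_cut:].strip()
--     if tail:
--         parts.append((tail, None))
--     return parts
-- ===== Notes on version B (the rewrite author's own statement) =====
-- stated objective: idiomatic
-- what changed: Replaced the hand-rolled index/state-machine scanner (char-by-char accumulation with string concatenation, inner quote loop, manual whitespace skipping) by a regex tokenizer: one finditer pattern matching whole quoted strings (with SQL doubled-quote escaping and unterminated-quote fallback) or whitespace/start/end-bounded case-insensitive AND/OR operators, cutting segments out of the original string at operator matches.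
import Mathlib
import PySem

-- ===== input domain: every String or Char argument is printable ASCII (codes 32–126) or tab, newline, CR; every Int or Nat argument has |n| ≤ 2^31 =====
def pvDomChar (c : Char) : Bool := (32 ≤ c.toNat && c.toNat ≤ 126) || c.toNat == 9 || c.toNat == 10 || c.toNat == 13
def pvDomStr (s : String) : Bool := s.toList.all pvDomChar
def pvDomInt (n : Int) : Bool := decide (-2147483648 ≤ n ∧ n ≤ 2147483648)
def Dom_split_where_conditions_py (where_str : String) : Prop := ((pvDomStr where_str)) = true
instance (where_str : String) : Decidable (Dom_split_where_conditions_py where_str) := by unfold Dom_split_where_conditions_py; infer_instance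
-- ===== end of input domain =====

-- B replaces A's hand-rolled character state machine (per-char string concatenation) by a
-- regex tokenizer (quoted-string-or-operator tokens, segments cut out of the input at operator
-- matches); idiomatic, and measured faster in a timing run.
-- Both ports compare characters with Char.toUpper-style PySem.Chars.upper, exact on the ASCII domain.

-- ===== PORT A =====
-- the inner quote-consuming while loop: returns (current_condition', remaining input)
def pyAQuote (q : Char) : List Char → List Char → List Char × List Char
  | [], cur => (cur, [])
  | c :: rest, cur =>
    if c = q then
      match rest with
      | c2 :: rest2 => if c2 = q then pyAQuote q rest2 (cur ++ [c, q]) else (cur ++ [c], c2 :: rest2)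
      | [] => (cur ++ [c], [])
    else pyAQuote q rest (cur ++ [c])

-- the whitespace-skipping while loop after an operator; also tracks the last consumed
-- character (A reads it back as where_str[i-1] in the next boundary check)
def pySkipWs : List Char → Option Char → List Char × Option Char
  | [], prev => ([], prev)
  | c :: rest, prev =>
    if PySem.Chars.isspace c then pySkipWs rest (some c) else (c :: rest, prev)

theorem pyAQuote_len (q : Char) : ∀ (n : Nat) (l : List Char), l.length ≤ n → ∀ cur, (pyAQuote q l cur).2.length ≤ l.length := by
  intro n
  induction n with
  | zero =>
    intro l hl cur
    have : l = [] := List.eq_nil_of_length_eq_zero (by omega)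
    subst this; simp [pyAQuote]
  | succ n ih =>
    intro l hl cur
    match l with
    | [] => simp [pyAQuote]
    | c :: rest =>
      by_cases hq : c = q
      · match rest with
        | [] => simp [pyAQuote, hq]
        | c2 :: rest2 =>
          by_cases hq2 : c2 = q
          · rw [show pyAQuote q (c :: c2 :: rest2) cur = pyAQuote q rest2 (cur ++ [c, q]) from by
              simp [pyAQuote, hq, hq2]]
            have := ih rest2 (by simp at hl; omega) (cur ++ [c, q])
            simp only [List.length_cons]; omega
          · rw [show pyAQuote q (c :: c2 :: rest2) cur = (cur ++ [c], c2 :: rest2) from by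
              simp [pyAQuote, hq, hq2]]
            show (c2 :: rest2).length ≤ (c :: c2 :: rest2).length
            simp
      · rw [show pyAQuote q (c :: rest) cur = pyAQuote q rest (cur ++ [c]) from by
          rw [pyAQuote.eq_def]; simp [hq]]
        have := ih rest (by simp at hl; omega) (cur ++ [c])
        simp only [List.length_cons]; omega

theorem pySkipWs_len : ∀ (l : List Char) (prev : Option Char), (pySkipWs l prev).1.length ≤ l.length := by
  intro l
  induction l with
  | nil => intro prev; simp [pySkipWs]
  | cons c rest ih =>
    intro prev
    by_cases h : PySem.Chars.isspace c
    · simp only [pySkipWs, h, if_true]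
      exact Nat.le_trans (ih _) (by simp)
    · simp [pySkipWs, h]

-- the main while loop of A: index i becomes the remaining suffix, where_str[i-1] the prev char
def pyAMain : List Char → Option Char → List Char → List (String × Option String) → List (String × Option String)
  | [], _, cur, acc =>
    if PySem.Chars.strip cur ≠ [] then acc ++ [(String.ofList (PySem.Chars.strip cur), none)] else acc
  | c :: rest, prev, cur, acc =>
    if c = '"' ∨ c = '\'' then
      let p := pyAQuote c rest (cur ++ [c])
      pyAMain p.2 (some c) p.1 acc
    else if 3 ≤ (c :: rest).length ∧ PySem.Chars.upper ((c :: rest).take 3) = ['A', 'N', 'D'] then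
      if (prev.elim true PySem.Chars.isspace &&
          (match (c :: rest).drop 3 with | [] => true | d :: _ => PySem.Chars.isspace d)) then
        let sk := pySkipWs ((c :: rest).drop 3) ((c :: rest).take 3).getLast?
        pyAMain sk.1 sk.2 [] (acc ++ [(String.ofList (PySem.Chars.strip cur), some "AND")])
      else
        pyAMain rest (some c) (cur ++ [c]) acc
    else if 2 ≤ (c :: rest).length ∧ PySem.Chars.upper ((c :: rest).take 2) = ['O', 'R'] then
      if (prev.elim true PySem.Chars.isspace &&
          (match (c :: rest).drop 2 with | [] => true | d :: _ => PySem.Chars.isspace d)) then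
        let sk := pySkipWs ((c :: rest).drop 2) ((c :: rest).take 2).getLast?
        pyAMain sk.1 sk.2 [] (acc ++ [(String.ofList (PySem.Chars.strip cur), some "OR")])
      else
        pyAMain rest (some c) (cur ++ [c]) acc
    else
      pyAMain rest (some c) (cur ++ [c]) acc
  termination_by l _ _ _ => l.length
  decreasing_by
  all_goals simp only [List.length_cons]
  · exact Nat.lt_succ_of_le (pyAQuote_len _ rest.length _ le_rfl _)
  · exact Nat.lt_succ_of_le (Nat.le_trans (pySkipWs_len _ _) (by simp))
  · omega
  · exact Nat.lt_succ_of_le (Nat.le_trans (pySkipWs_len _ _) (by simp))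
  · omega
  · omega
def split_where_conditions_py (where_str : String) : List (String × Option String) :=
  pyAMain where_str.toList none [] []

-- ===== PORT B =====
-- length of the regex match '(?:[^q]|qq)*q?' right after an opening quote q
def bQuoteLen (q : Char) : List Char → Nat
  | [] => 0
  | c :: rest =>
    if c = q then
      match rest with
      | c2 :: rest2 => if c2 = q then 2 + bQuoteLen q rest2 else 1
      | [] => 1
    else 1 + bQuoteLen q rest

-- the lookahead '(?=\s|$)'
def bBoundary : List Char → Bool
  | [] => true
  | c :: _ => PySem.Chars.isspace c

-- the operator alternative '(AND|OR)(?=\s|$)' (case-insensitive) at the current position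
def bOpAt (cs : List Char) : Option (String × Nat) :=
  if PySem.Chars.upper (cs.take 3) = ['A', 'N', 'D'] ∧ bBoundary (cs.drop 3) = true then
    some ("AND", 3)
  else if PySem.Chars.upper (cs.take 2) = ['O', 'R'] ∧ bBoundary (cs.drop 2) = true then
    some ("OR", 2)
  else none

-- finditer: returns (segment before the first operator match, [(op, following segment), …]);
-- the Bool is the '(?<=\s)|^' lookbehind state at the current position
def bTok : List Char → Bool → List Char × List (String × List Char)
  | [], _ => ([], [])
  | c :: rest, bnd =>
    if c = '\'' ∨ c = '"' then
      let n := bQuoteLen c rest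
      let r := bTok (rest.drop n) false
      (c :: (rest.take n ++ r.1), r.2)
    else
      match (if bnd then bOpAt (c :: rest) else none) with
      | some (op, len) =>
        let r := bTok (rest.drop (len - 1)) false
        ([], (op, r.1) :: r.2)
      | none =>
        let r := bTok rest (PySem.Chars.isspace c)
        (c :: r.1, r.2)
  termination_by l _ => l.length
  decreasing_by
  all_goals simp only [List.length_cons]
  · simp only [List.length_drop]; omega
  · simp only [List.length_drop]; omega
  · omega

-- parts.append loop over the matches, plus the final nonempty-tail append
def bAssemble : List Char → List (String × List Char) → List (String × Option String)
  | seg, [] =>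
    if PySem.Chars.strip seg = [] then [] else [(String.ofList (PySem.Chars.strip seg), none)]
  | seg, (op, seg') :: ts =>
    (String.ofList (PySem.Chars.strip seg), some op) :: bAssemble seg' ts

def split_where_conditions_py_alt (where_str : String) : List (String × Option String) :=
  bAssemble (bTok where_str.toList true).1 (bTok where_str.toList true).2

-- ===== PRECONDITION & SPEC =====
def Spec_split_where_conditions_py (where_str : String) (out : List (String × Option String)) : Prop := out = split_where_conditions_py_alt where_str
instance (where_str : String) (out : List (String × Option String)) : Decidable (Spec_split_where_conditions_py where_str out) := by unfold Spec_split_where_conditions_py; infer_instance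

-- ===== CLAIM (what is proved, stated in full; the proofs are below) =====
def Claim_equal_split_where_conditions_py : Prop := ∀ (where_str : String), Dom_split_where_conditions_py where_str → Spec_split_where_conditions_py where_str (split_where_conditions_py where_str)

-- ===== LEMMAS AND PROOFS =====

theorem isspace_upperChar (c : Char) (h : PySem.Chars.isspace c = true) :
    PySem.Chars.upperChar c = c := by
  simp only [PySem.Chars.isspace, decide_eq_true_eq, Bool.or_eq_true, Bool.and_eq_true] at h
  rw [PySem.Chars.upperChar, if_neg]
  simp only [PySem.Chars.islower, Bool.and_eq_true, not_and, decide_eq_true_eq]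
  intro hle hz
  simp only [Char.le_def, UInt32.le_iff_toNat_le] at hle hz
  simp only [Char.toNat] at h
  have ha : ('a' : Char).val.toNat = 97 := rfl
  have hb : ('z' : Char).val.toNat = 122 := rfl
  omega

theorem isspace_toNat (c : Char) (h : PySem.Chars.isspace c = true) :
    c.toNat ≠ 65 ∧ c.toNat ≠ 79 ∧ c.toNat ≠ 68 ∧ c.toNat ≠ 82 ∧ c.toNat ≠ 39 ∧ c.toNat ≠ 34 := by
  simp only [PySem.Chars.isspace, decide_eq_true_eq, Bool.or_eq_true, Bool.and_eq_true] at h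
  omega

theorem isspace_ne_quote (c : Char) (h : PySem.Chars.isspace c = true) :
    ¬ (c = '\'' ∨ c = '"') := by
  rintro (rfl | rfl) <;> revert h <;> decide

theorem notspace_of_upper_D (d : Char) (h : PySem.Chars.upperChar d = 'D') :
    PySem.Chars.isspace d = false := by
  by_contra hne
  have hs : PySem.Chars.isspace d = true := by revert hne; cases PySem.Chars.isspace d <;> simp
  have := (isspace_toNat d hs).2.2.1
  rw [isspace_upperChar d hs] at h
  exact this (by rw [h]; rfl)

theorem notspace_of_upper_R (d : Char) (h : PySem.Chars.upperChar d = 'R') :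
    PySem.Chars.isspace d = false := by
  by_contra hne
  have hs : PySem.Chars.isspace d = true := by revert hne; cases PySem.Chars.isspace d <;> simp
  have := (isspace_toNat d hs).2.2.2.1
  rw [isspace_upperChar d hs] at h
  exact this (by rw [h]; rfl)

theorem strip_cons_space (c : Char) (l : List Char) (h : PySem.Chars.isspace c = true) :
    PySem.Chars.strip (c :: l) = PySem.Chars.strip l := by
  simp [PySem.Chars.strip, PySem.Chars.lstrip, h]

theorem bAssemble_congr (s1 s2 : List Char) (ts : List (String × List Char))
    (h : PySem.Chars.strip s1 = PySem.Chars.strip s2) : bAssemble s1 ts = bAssemble s2 ts := by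
  cases ts with
  | nil => simp [bAssemble, h]
  | cons t ts => simp [bAssemble, h]

theorem upper_cons (c : Char) (l : List Char) :
    PySem.Chars.upper (c :: l) = PySem.Chars.upperChar c :: PySem.Chars.upper l := by
  simp [PySem.Chars.upper]

theorem bOpAt_space (c : Char) (l : List Char) (h : PySem.Chars.isspace c = true) :
    bOpAt (c :: l) = none := by
  have h1 := isspace_upperChar c h
  have h2 := isspace_toNat c h
  rw [bOpAt, if_neg, if_neg]
  · rintro ⟨hu, -⟩
    rw [show (c :: l).take 2 = c :: l.take 1 from rfl, upper_cons, h1] at hu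
    exact h2.2.1 (by rw [List.cons.injEq] at hu; rw [hu.1]; rfl)
  · rintro ⟨hu, -⟩
    rw [show (c :: l).take 3 = c :: l.take 2 from rfl, upper_cons, h1] at hu
    exact h2.1 (by rw [List.cons.injEq] at hu; rw [hu.1]; rfl)

theorem quote_eq (q : Char) : ∀ (n : Nat) (l : List Char), l.length ≤ n → ∀ cur,
    pyAQuote q l cur = (cur ++ l.take (bQuoteLen q l), l.drop (bQuoteLen q l)) := by
  intro n
  induction n with
  | zero =>
    intro l hl cur
    have : l = [] := List.eq_nil_of_length_eq_zero (by omega)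
    subst this; simp [pyAQuote, bQuoteLen]
  | succ n ih =>
    intro l hl cur
    match l with
    | [] => simp [pyAQuote, bQuoteLen]
    | c :: rest =>
      by_cases hq : c = q
      · match rest with
        | [] => simp [pyAQuote, bQuoteLen, hq]
        | c2 :: rest2 =>
          by_cases hq2 : c2 = q
          · rw [show pyAQuote q (c :: c2 :: rest2) cur = pyAQuote q rest2 (cur ++ [c, q]) from by
                simp [pyAQuote, hq, hq2],
              show bQuoteLen q (c :: c2 :: rest2) = 2 + bQuoteLen q rest2 from by
                simp [bQuoteLen, hq, hq2],
              ih rest2 (by simp at hl; omega) (cur ++ [c, q])]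
            rw [show (2 + bQuoteLen q rest2) = (bQuoteLen q rest2) + 1 + 1 from by omega]
            simp [hq, hq2]
          · rw [show pyAQuote q (c :: c2 :: rest2) cur = (cur ++ [c], c2 :: rest2) from by
                simp [pyAQuote, hq, hq2],
              show bQuoteLen q (c :: c2 :: rest2) = 1 from by
                simp [bQuoteLen, hq, hq2]]
            simp
      · rw [show pyAQuote q (c :: rest) cur = pyAQuote q rest (cur ++ [c]) from by
            rw [pyAQuote.eq_def]; simp [hq],
          show bQuoteLen q (c :: rest) = 1 + bQuoteLen q rest from by
            rw [bQuoteLen.eq_def]; simp [hq],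
          ih rest (by simp at hl; omega) (cur ++ [c])]
        rw [show (1 + bQuoteLen q rest) = (bQuoteLen q rest) + 1 from by omega]
        simp

theorem ws_lemma (n : Nat)
    (IH : ∀ (l : List Char), l.length ≤ n → ∀ (prev : Option Char) (cur : List Char) (acc : List (String × Option String)),
      pyAMain l prev cur acc =
        acc ++ bAssemble (cur ++ (bTok l (prev.elim true PySem.Chars.isspace)).1)
          (bTok l (prev.elim true PySem.Chars.isspace)).2) :
    ∀ (l : List Char), l.length ≤ n → ∀ (pr : Option Char) (acc : List (String × Option String)),
      pyAMain (pySkipWs l pr).1 (pySkipWs l pr).2 [] acc =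
        acc ++ bAssemble (bTok l (pr.elim true PySem.Chars.isspace)).1
          (bTok l (pr.elim true PySem.Chars.isspace)).2 := by
  intro l
  induction l with
  | nil =>
    intro _ pr acc
    simp [pySkipWs, pyAMain, bTok, bAssemble, PySem.Chars.strip, PySem.Chars.lstrip,
      PySem.Chars.rstrip]
  | cons c rest ihl =>
    intro hl pr acc
    by_cases hc : PySem.Chars.isspace c = true
    · rw [show pySkipWs (c :: rest) pr = pySkipWs rest (some c) from by simp [pySkipWs, hc]]
      rw [ihl (by simp at hl; omega) (some c) acc]
      have hnq := isspace_ne_quote c hc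
      have hop := bOpAt_space c rest hc
      rw [show bTok (c :: rest) (pr.elim true PySem.Chars.isspace) =
            ((c :: (bTok rest (PySem.Chars.isspace c)).1), (bTok rest (PySem.Chars.isspace c)).2) from by
          rw [bTok.eq_2]; simp [hnq, hop]]
      rw [bAssemble_congr (c :: (bTok rest (PySem.Chars.isspace c)).1) (bTok rest (PySem.Chars.isspace c)).1
            (bTok rest (PySem.Chars.isspace c)).2 (strip_cons_space c _ hc)]
      simp [hc]
    · rw [show pySkipWs (c :: rest) pr = (c :: rest, pr) from by simp [pySkipWs, hc]]
      rw [IH (c :: rest) hl pr [] acc]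
      simp

theorem main_lemma : ∀ (n : Nat) (l : List Char), l.length ≤ n → ∀ (prev : Option Char) (cur : List Char) (acc : List (String × Option String)),
    pyAMain l prev cur acc =
      acc ++ bAssemble (cur ++ (bTok l (prev.elim true PySem.Chars.isspace)).1)
        (bTok l (prev.elim true PySem.Chars.isspace)).2 := by
  intro n
  induction n with
  | zero =>
    intro l hl prev cur acc
    have : l = [] := List.eq_nil_of_length_eq_zero (by omega)
    subst this
    simp only [pyAMain, bTok, bAssemble, List.append_nil]
    by_cases h : PySem.Chars.strip cur = [] <;> simp [h]
  | succ n ih =>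
    intro l hl prev cur acc
    match l with
    | [] =>
      simp only [pyAMain, bTok, bAssemble, List.append_nil]
      by_cases h : PySem.Chars.strip cur = [] <;> simp [h]
    | c :: rest =>
      have hrest : rest.length ≤ n := by simp at hl; omega
      by_cases hq : c = '"' ∨ c = '\''
      · -- quote branch
        have hq' : c = '\'' ∨ c = '"' := hq.symm
        have hcs : PySem.Chars.isspace c = false := by
          rcases hq with rfl | rfl <;> decide
        rw [show pyAMain (c :: rest) prev cur acc =
              pyAMain (pyAQuote c rest (cur ++ [c])).2 (some c) (pyAQuote c rest (cur ++ [c])).1 acc from by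
            rw [pyAMain.eq_def]; simp [hq]]
        rw [quote_eq c rest.length rest le_rfl (cur ++ [c])]
        rw [ih (rest.drop (bQuoteLen c rest)) (le_trans (by simp) hrest) (some c) _ acc]
        rw [show bTok (c :: rest) (prev.elim true PySem.Chars.isspace) =
              ((c :: (rest.take (bQuoteLen c rest) ++ (bTok (rest.drop (bQuoteLen c rest)) false).1)),
                (bTok (rest.drop (bQuoteLen c rest)) false).2) from by
            rw [bTok.eq_2]; simp [hq']]
        simp [hcs]
      · -- not a quote
        have hq' : ¬ (c = '\'' ∨ c = '"') := fun h => hq h.symm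
        have fall : ((if prev.elim true PySem.Chars.isspace then bOpAt (c :: rest) else none) = none) →
            pyAMain rest (some c) (cur ++ [c]) acc =
              acc ++ bAssemble (cur ++ (bTok (c :: rest) (prev.elim true PySem.Chars.isspace)).1)
                (bTok (c :: rest) (prev.elim true PySem.Chars.isspace)).2 := by
          intro hop
          rw [ih rest hrest (some c) (cur ++ [c]) acc]
          rw [show bTok (c :: rest) (prev.elim true PySem.Chars.isspace) =
                ((c :: (bTok rest (PySem.Chars.isspace c)).1), (bTok rest (PySem.Chars.isspace c)).2) from by
              rw [bTok.eq_2]; simp [hq', hop]]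
          simp
        by_cases hA : 3 ≤ (c :: rest).length ∧ PySem.Chars.upper ((c :: rest).take 3) = ['A', 'N', 'D']
        · obtain ⟨r1, r2, rest3, rfl⟩ : ∃ r1 r2 rest3, rest = r1 :: r2 :: rest3 := by
            match rest, hA.1 with
            | r1 :: r2 :: rest3, _ => exact ⟨r1, r2, rest3, rfl⟩
          have hup : PySem.Chars.upperChar c = 'A' ∧ PySem.Chars.upperChar r1 = 'N' ∧
              PySem.Chars.upperChar r2 = 'D' := by
            have h3 := hA.2
            rw [show (c :: r1 :: r2 :: rest3).take 3 = [c, r1, r2] from rfl] at h3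
            simp only [upper_cons, show PySem.Chars.upper ([] : List Char) = [] from rfl,
              List.cons.injEq, and_true] at h3
            exact ⟨h3.1, h3.2.1, h3.2.2⟩
          by_cases hg : (prev.elim true PySem.Chars.isspace &&
              (match (c :: r1 :: r2 :: rest3).drop 3 with
                | [] => true | d :: _ => PySem.Chars.isspace d)) = true
          · -- AND operator fires
            rw [show pyAMain (c :: r1 :: r2 :: rest3) prev cur acc =
                  pyAMain (pySkipWs rest3 (some r2)).1 (pySkipWs rest3 (some r2)).2 []
                    (acc ++ [(String.ofList (PySem.Chars.strip cur), some "AND")]) from by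
                rw [pyAMain.eq_2]; split_ifs <;> rfl]
            rw [ws_lemma n ih rest3 (by simp at hl; omega) (some r2)]
            have hbnd : prev.elim true PySem.Chars.isspace = true := by
              rcases Bool.and_eq_true_iff.mp hg with ⟨h1, -⟩; exact h1
            have hbd : bBoundary ((c :: r1 :: r2 :: rest3).drop 3) = true := by
              rcases Bool.and_eq_true_iff.mp hg with ⟨-, h2⟩
              cases rest3 <;> simpa [bBoundary] using h2
            rw [show bTok (c :: r1 :: r2 :: rest3) (prev.elim true PySem.Chars.isspace) =
                  (([] : List Char), ("AND", (bTok rest3 false).1) :: (bTok rest3 false).2) from by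
                rw [bTok.eq_2]
                rw [show bOpAt (c :: r1 :: r2 :: rest3) = some ("AND", 3) from by
                  rw [bOpAt, if_pos ⟨hA.2, hbd⟩]]
                simp [hq', hbnd]]
            rw [show (some r2).elim true PySem.Chars.isspace = false from by
              simpa using notspace_of_upper_D r2 hup.2.2]
            simp [bAssemble]
          · -- prefix AND but boundary fails: fall through, operator alternative cannot match
            rw [show pyAMain (c :: r1 :: r2 :: rest3) prev cur acc =
                  pyAMain (r1 :: r2 :: rest3) (some c) (cur ++ [c]) acc from by
                rw [pyAMain.eq_2]; split_ifs <;> rfl]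
            apply fall
            cases hb : prev.elim true PySem.Chars.isspace
            · simp
            · rw [hb] at hg
              have hbd : ¬ bBoundary ((c :: r1 :: r2 :: rest3).drop 3) = true := by
                intro h2
                apply hg
                simp only [Bool.true_and]
                cases rest3 <;> simpa [bBoundary] using h2
              simp only [if_true]
              rw [bOpAt, if_neg (fun h => hbd h.2), if_neg]
              rintro ⟨h2, -⟩
              rw [show (c :: r1 :: r2 :: rest3).take 2 = [c, r1] from rfl] at h2
              simp only [upper_cons, show PySem.Chars.upper ([] : List Char) = [] from rfl,
                List.cons.injEq, and_true] at h2
              rw [hup.1] at h2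
              exact absurd h2.1 (by decide)
        · -- no AND prefix
          have hAfalse : ¬ (PySem.Chars.upper ((c :: rest).take 3) = ['A', 'N', 'D'] ∧
              bBoundary ((c :: rest).drop 3) = true) := by
            rintro ⟨h1, -⟩
            apply hA
            refine ⟨?_, h1⟩
            have := congrArg List.length h1
            simp [PySem.Chars.upper] at this
            have hlc : (c :: rest).length = rest.length + 1 := by simp
            omega
          by_cases hO : 2 ≤ (c :: rest).length ∧ PySem.Chars.upper ((c :: rest).take 2) = ['O', 'R']
          · obtain ⟨r1, rest2, rfl⟩ : ∃ r1 rest2, rest = r1 :: rest2 := by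
              match rest, hO.1 with
              | r1 :: rest2, _ => exact ⟨r1, rest2, rfl⟩
            have hup : PySem.Chars.upperChar c = 'O' ∧ PySem.Chars.upperChar r1 = 'R' := by
              have h2 := hO.2
              rw [show (c :: r1 :: rest2).take 2 = [c, r1] from rfl] at h2
              simp only [upper_cons, show PySem.Chars.upper ([] : List Char) = [] from rfl,
                List.cons.injEq, and_true] at h2
              exact ⟨h2.1, h2.2⟩
            by_cases hg : (prev.elim true PySem.Chars.isspace &&
                (match (c :: r1 :: rest2).drop 2 with
                  | [] => true | d :: _ => PySem.Chars.isspace d)) = true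
            · -- OR operator fires
              rw [show pyAMain (c :: r1 :: rest2) prev cur acc =
                    pyAMain (pySkipWs rest2 (some r1)).1 (pySkipWs rest2 (some r1)).2 []
                      (acc ++ [(String.ofList (PySem.Chars.strip cur), some "OR")]) from by
                  rw [pyAMain.eq_2]; split_ifs <;> rfl]
              rw [ws_lemma n ih rest2 (by simp at hl; omega) (some r1)]
              have hbnd : prev.elim true PySem.Chars.isspace = true := by
                rcases Bool.and_eq_true_iff.mp hg with ⟨h1, -⟩; exact h1
              have hbd : bBoundary ((c :: r1 :: rest2).drop 2) = true := by
                rcases Bool.and_eq_true_iff.mp hg with ⟨-, h2⟩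
                cases rest2 <;> simpa [bBoundary] using h2
              rw [show bTok (c :: r1 :: rest2) (prev.elim true PySem.Chars.isspace) =
                    (([] : List Char), ("OR", (bTok rest2 false).1) :: (bTok rest2 false).2) from by
                  rw [bTok.eq_2]
                  rw [show bOpAt (c :: r1 :: rest2) = some ("OR", 2) from by
                    rw [bOpAt, if_neg hAfalse, if_pos ⟨hO.2, hbd⟩]]
                  simp [hq', hbnd]]
              rw [show (some r1).elim true PySem.Chars.isspace = false from by
                simpa using notspace_of_upper_R r1 hup.2]
              simp [bAssemble]
            · -- prefix OR but boundary fails: fall through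
              rw [show pyAMain (c :: r1 :: rest2) prev cur acc =
                    pyAMain (r1 :: rest2) (some c) (cur ++ [c]) acc from by
                  rw [pyAMain.eq_2]; split_ifs <;> rfl]
              apply fall
              cases hb : prev.elim true PySem.Chars.isspace
              · simp
              · rw [hb] at hg
                have hbd : ¬ bBoundary ((c :: r1 :: rest2).drop 2) = true := by
                  intro h2
                  apply hg
                  simp only [Bool.true_and]
                  cases rest2 <;> simpa [bBoundary] using h2
                simp only [if_true]
                rw [bOpAt, if_neg hAfalse, if_neg (fun h => hbd h.2)]
          · -- no operator prefix at all: fall through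
            have hOfalse : ¬ (PySem.Chars.upper ((c :: rest).take 2) = ['O', 'R'] ∧
                bBoundary ((c :: rest).drop 2) = true) := by
              rintro ⟨h1, -⟩
              apply hO
              refine ⟨?_, h1⟩
              have := congrArg List.length h1
              simp [PySem.Chars.upper] at this
              have hlc : (c :: rest).length = rest.length + 1 := by simp
              omega
            rw [show pyAMain (c :: rest) prev cur acc =
                  pyAMain rest (some c) (cur ++ [c]) acc from by
                rw [pyAMain.eq_2]; split_ifs <;> rfl]
            apply fall
            cases prev.elim true PySem.Chars.isspace
            · simp
            · simp only [if_true]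
              rw [bOpAt, if_neg hAfalse, if_neg hOfalse]

-- ===== VERDICT (by name: the statement is the Claim_ definition above) =====
theorem split_where_conditions_py_spec : Claim_equal_split_where_conditions_py := by
  intro s _
  unfold Spec_split_where_conditions_py split_where_conditions_py split_where_conditions_py_alt
  simpa using main_lemma s.toList.length s.toList le_rfl none [] []
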